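-- pv_equiv track=rewrite | github.com/sandwichcoders/broodcode-core | BroodCodeCore/filter.py | get_sandwich_by_ingredients
-- ===== SOURCE A (Python) =====
-- SANDWICH_TYPING = dict[str, tuple[str, str, int, str]]
--
-- def get_sandwich_by_ingredients(ingredients: list, sandwiches: SANDWICH_TYPING):
--     """
--     Get sandwiches by the ingredients they contain
--     Args:
--         ingredients: The ingredients the sandwiches may contain
--         sandwiches: List of sandwiches to pick from
--
--     Returns: A list of sandwiches which contains the given ingredients
--     """
--     found_sandwiches = []
--
--     for ingredient in ingredients:
--         for sandwich in sandwiches.values():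
--             if found_sandwiches and found_sandwiches[-1]["sandwich"] == sandwich[0]:
--                 continue
--             sandwich_ing = sandwich[-1].replace(",", "")
--             sandwich_ing = sandwich_ing.split(" ")
--
--             if ingredient in sandwich_ing:
--                 found_sandwiches.append({'sandwich': sandwich[0], 'ingredients': sandwich[-1]})
--
--     if 0 == len(found_sandwiches):
--         found_sandwiches.append(None)
--
--     return found_sandwiches
-- ===== SOURCE B (Python) =====
-- def get_sandwich_by_ingredients(ingredients, sandwiches):
--     matches = [
--         {'sandwich': s[0], 'ingredients': s[-1]}
--         for ingredient in ingredients
--         for s in sandwiches.values()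
--         if ingredient in s[-1].replace(",", "").split(" ")
--     ]
--     result = []
--     for m in matches:
--         if not result or result[-1]['sandwich'] != m['sandwich']:
--             result.append(m)
--     return result if result else [None]
-- ===== Notes on version B (the rewrite author's own statement) =====
-- stated objective: alternative
-- what changed: A interleaves matching with a lookback dedup inside the nested loop; B first builds the full match list with a comprehension, then collapses consecutive same-name entries in a separate single dedup pass.
import Mathlib
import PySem

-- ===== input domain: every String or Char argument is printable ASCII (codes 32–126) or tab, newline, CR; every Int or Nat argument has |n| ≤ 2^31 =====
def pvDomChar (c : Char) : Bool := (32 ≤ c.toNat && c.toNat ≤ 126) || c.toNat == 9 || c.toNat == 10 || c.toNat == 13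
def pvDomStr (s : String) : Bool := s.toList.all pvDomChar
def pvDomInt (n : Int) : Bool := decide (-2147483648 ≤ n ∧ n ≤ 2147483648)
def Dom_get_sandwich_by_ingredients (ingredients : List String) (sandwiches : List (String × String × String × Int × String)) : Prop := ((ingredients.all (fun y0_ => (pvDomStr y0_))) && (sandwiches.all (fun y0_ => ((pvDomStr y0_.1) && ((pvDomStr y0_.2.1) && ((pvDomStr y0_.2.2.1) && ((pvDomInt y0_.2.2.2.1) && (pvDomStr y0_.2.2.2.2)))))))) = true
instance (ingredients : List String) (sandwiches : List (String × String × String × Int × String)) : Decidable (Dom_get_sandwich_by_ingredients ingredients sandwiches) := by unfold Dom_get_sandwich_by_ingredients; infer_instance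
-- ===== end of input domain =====

-- B replaces A's interleaved match-and-lookback loop by two passes (a comprehension of all
-- matches, then one dedup pass collapsing consecutive same-name entries): same values, 'alternative' objective.

-- tokens of sandwich[-1]: sandwich[-1].replace(",", "").split(" ")
def pvTokens (ing : String) : List String :=
  (PySem.Str.split? (PySem.Str.replace ing "," "") " ").getD []  -- sep " " ≠ "", so split? is always `some`

-- ===== PORT A =====
def get_sandwich_by_ingredients (ingredients : List String) (sandwiches : List (String × String × String × Int × String)) : List (Option (List (String × String))) :=
  let found := ingredients.foldl (fun found ingredient =>
    (PySem.Dict.ofList sandwiches).values.foldl (fun found sandwich =>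
      -- `if found_sandwiches and found_sandwiches[-1]["sandwich"] == sandwich[0]: continue`
      if !found.isEmpty &&
          (match PySem.List.pyGet? found (-1) with
           | some (some d) => PySem.Dict.get? (PySem.Dict.mk d) "sandwich" == some sandwich.1
           | _ => false) then found
      else if ingredient ∈ pvTokens sandwich.2.2.2 then
        found ++ [some [("sandwich", sandwich.1), ("ingredients", sandwich.2.2.2)]]
      else found) found) ([] : List (Option (List (String × String))))
  if found.length = 0 then found ++ [none] else found

-- ===== PORT B =====
def get_sandwich_by_ingredients_alt (ingredients : List String) (sandwiches : List (String × String × String × Int × String)) : List (Option (List (String × String))) :=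
  -- the comprehension: every match, in nested order
  let ms := ingredients.flatMap (fun ingredient =>
    (((PySem.Dict.ofList sandwiches).values.filter (fun s =>
        ingredient ∈ pvTokens s.2.2.2)).map
      (fun s => [("sandwich", s.1), ("ingredients", s.2.2.2)])))
  -- dedup pass: keep an entry only when the previously kept name differs
  let result := ms.foldl (fun res m =>
    if res.isEmpty ||
        !((match PySem.List.pyGet? res (-1) with
           | some d => PySem.Dict.get? (PySem.Dict.mk d) "sandwich"
           | none => none) == PySem.Dict.get? (PySem.Dict.mk m) "sandwich")
    then res ++ [m] else res) ([] : List (List (String × String)))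
  if result.isEmpty then [none] else result.map some

-- ===== PRECONDITION & SPEC =====
def Spec_get_sandwich_by_ingredients (ingredients : List String) (sandwiches : List (String × String × String × Int × String)) (out : List (Option (List (String × String)))) : Prop := out = get_sandwich_by_ingredients_alt ingredients sandwiches
instance (ingredients : List String) (sandwiches : List (String × String × String × Int × String)) (out : List (Option (List (String × String)))) : Decidable (Spec_get_sandwich_by_ingredients ingredients sandwiches out) := by unfold Spec_get_sandwich_by_ingredients; infer_instance

-- ===== CLAIM (what is proved, stated in full; the proofs are below) =====
def Claim_equal_get_sandwich_by_ingredients : Prop := ∀ (ingredients : List String) (sandwiches : List (String × String × String × Int × String)), Dom_get_sandwich_by_ingredients ingredients sandwiches → Spec_get_sandwich_by_ingredients ingredients sandwiches (get_sandwich_by_ingredients ingredients sandwiches)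

-- ===== LEMMAS AND PROOFS =====

-- named copies of the two loop bodies (definitionally equal to the lambdas in the ports)
def pvEntry (s : String × String × Int × String) : List (String × String) :=
  [("sandwich", s.1), ("ingredients", s.2.2.2)]

def pvStepA (ingredient : String) (found : List (Option (List (String × String))))
    (sandwich : String × String × Int × String) : List (Option (List (String × String))) :=
  if !found.isEmpty &&
      (match PySem.List.pyGet? found (-1) with
       | some (some d) => PySem.Dict.get? (PySem.Dict.mk d) "sandwich" == some sandwich.1
       | _ => false) then found
  else if ingredient ∈ pvTokens sandwich.2.2.2 then
    found ++ [some (pvEntry sandwich)]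
  else found

def pvStepD (res : List (List (String × String))) (m : List (String × String)) :
    List (List (String × String)) :=
  if res.isEmpty ||
      !((match PySem.List.pyGet? res (-1) with
         | some d => PySem.Dict.get? (PySem.Dict.mk d) "sandwich"
         | none => none) == PySem.Dict.get? (PySem.Dict.mk m) "sandwich")
  then res ++ [m] else res

-- one A-step from a some-mapped state is a some-mapped dedup step on the matching entry (if any)
theorem pvStepA_eq (ing : String) (res : List (List (String × String)))
    (x : String × String × Int × String) :
    pvStepA ing (res.map some) x =
      (if ing ∈ pvTokens x.2.2.2 then pvStepD res (pvEntry x) else res).map some := by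
  rcases List.eq_nil_or_concat res with rfl | ⟨rs, r, rfl⟩
  · by_cases hm : ing ∈ pvTokens x.2.2.2 <;> simp [pvStepA, pvStepD, hm]
  · by_cases hm : ing ∈ pvTokens x.2.2.2 <;>
      by_cases hs : PySem.Dict.get? (PySem.Dict.mk r) "sandwich" == some x.1 <;>
        simp_all [pvStepA, pvStepD, pvEntry, List.concat_eq_append,
          PySem.List.pyGet?_neg_one_append_singleton, PySem.Dict.get?_mk_cons]

-- A's inner loop over xs = dedup-fold over the matching entries of xs
theorem pvInner_eq (ing : String) (xs : List (String × String × Int × String))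
    (res : List (List (String × String))) :
    xs.foldl (pvStepA ing) (res.map some) =
      (((xs.filter (fun s => ing ∈ pvTokens s.2.2.2)).map pvEntry).foldl pvStepD res).map some := by
  induction xs generalizing res with
  | nil => rfl
  | cons x xs ih =>
      simp only [List.foldl_cons, pvStepA_eq, List.filter_cons]
      by_cases hm : ing ∈ pvTokens x.2.2.2 <;> simp [hm, ih]

-- A's nested loop = dedup-fold over the flat comprehension
theorem pvNested_eq (ings : List String) (vals : List (String × String × Int × String))
    (res : List (List (String × String))) :
    ings.foldl (fun found ing => vals.foldl (pvStepA ing) found) (res.map some) =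
      ((ings.flatMap (fun ing =>
          (vals.filter (fun s => ing ∈ pvTokens s.2.2.2)).map pvEntry)).foldl pvStepD res).map some := by
  induction ings generalizing res with
  | nil => rfl
  | cons ing ings ih =>
      simp only [List.foldl_cons, List.flatMap_cons, List.foldl_append, pvInner_eq, ih]

-- ===== VERDICT (by name: the statement is the Claim_ definition above) =====
theorem get_sandwich_by_ingredients_spec : Claim_equal_get_sandwich_by_ingredients := by
  intro ingredients sandwiches _
  show get_sandwich_by_ingredients ingredients sandwiches
      = get_sandwich_by_ingredients_alt ingredients sandwiches
  have hA : get_sandwich_by_ingredients ingredients sandwiches =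
      (let found := ingredients.foldl
          (fun found ing => (PySem.Dict.ofList sandwiches).values.foldl (pvStepA ing) found)
          (([] : List (List (String × String))).map some)
       if found.length = 0 then found ++ [none] else found) := rfl
  have hB : get_sandwich_by_ingredients_alt ingredients sandwiches =
      (let result := (ingredients.flatMap (fun ing =>
            ((PySem.Dict.ofList sandwiches).values.filter
              (fun s => ing ∈ pvTokens s.2.2.2)).map pvEntry)).foldl pvStepD []
       if result.isEmpty then [none] else result.map some) := rfl
  rw [hA, hB]
  simp only [pvNested_eq]
  generalize (ingredients.flatMap (fun ing =>
      ((PySem.Dict.ofList sandwiches).values.filter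
        (fun s => ing ∈ pvTokens s.2.2.2)).map pvEntry)).foldl pvStepD ([] : List (List (String × String))) = R
  rcases R with _ | ⟨m, ms⟩ <;> simp
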